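-- pv_equiv track=rewrite | github.com/Davijluna/Restaurant-Orders | src/analyze_log.py | func_max_orders
-- ===== SOURCE A (Python) =====
-- def func_max_orders(client, orders):
--     dishes = {}
--
--     for customer, dish, _ in orders:
--         if customer == client:
--             if dish in dishes:
--                 dishes[dish] += 1
--             else:
--                 dishes[dish] = 1
--     return max(dishes.items(), key=lambda x: x[1])[0]
-- ===== SOURCE B (Python) =====
-- def func_max_orders(client, orders):
--     picks = [dish for customer, dish, _ in orders if customer == client]
--     best, bestc = None, 0
--     rest = picks
--     while rest:
--         d = rest[0]
--         remaining = [x for x in rest if x != d]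
--         c = len(rest) - len(remaining)
--         if c > bestc:
--             best, bestc = d, c
--         rest = remaining
--     return best
-- ===== Notes on version B (the rewrite author's own statement) =====
-- stated objective: alternative
-- what changed: Replaces A's incrementally maintained count dictionary plus max over its items by a worklist-elimination loop: repeatedly take the first remaining dish, measure its multiplicity as the length drop when all its occurrences are filtered out, keep a running best under strict >, and continue on the shrunken list; first-seen tie-breaking coincides with A's first-inserted dict key because distinct dishes are visited in first-occurrence order.
import Mathlib
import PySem

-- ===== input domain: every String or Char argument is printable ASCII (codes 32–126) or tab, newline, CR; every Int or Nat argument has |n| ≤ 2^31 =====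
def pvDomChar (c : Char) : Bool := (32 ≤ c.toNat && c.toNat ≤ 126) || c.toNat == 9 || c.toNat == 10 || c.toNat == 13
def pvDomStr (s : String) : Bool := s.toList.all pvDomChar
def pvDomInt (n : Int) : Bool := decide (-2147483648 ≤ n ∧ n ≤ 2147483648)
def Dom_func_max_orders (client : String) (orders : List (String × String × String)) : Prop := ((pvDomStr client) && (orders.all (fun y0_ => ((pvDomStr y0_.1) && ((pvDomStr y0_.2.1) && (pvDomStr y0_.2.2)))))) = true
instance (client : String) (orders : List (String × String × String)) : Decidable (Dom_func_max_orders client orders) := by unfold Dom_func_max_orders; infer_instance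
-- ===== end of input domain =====

-- B replaces A's running count dictionary by a worklist-elimination loop (strip all occurrences of the first remaining dish, length drop = its count, running best under strict >) — objective: alternative; on a client with no orders A raises ValueError (outside Pre_) while B returns None (ported as "").


-- ===== PORT A =====
def func_max_orders (client : String) (orders : List (String × String × String)) : String :=
  let dishes := orders.foldl
    (fun d o =>
      if o.1 == client then
        if d.contains o.2.1 then d.insert o.2.1 (d.getD o.2.1 0 + 1)
        else d.insert o.2.1 (1 : Int)
      else d)
    PySem.Dict.empty
  -- max(dishes.items(), key=lambda x: x[1])[0]; on an empty dict Python raises ValueError (outside Pre_)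
  match PySem.List.max? dishes.items (fun x => x.2) with
  | some p => p.1
  | none => ""

-- ===== PORT B =====
-- the while-loop of Source B: strip all occurrences of the first remaining dish, keep running best
def bgo (best : Option String) (bestc : Int) (rest : List String) : Option String :=
  match rest with
  | [] => best
  | d :: t =>
    let remaining := (d :: t).filter (fun x => !(x == d))
    let c : Int := ((d :: t).length : Int) - (remaining.length : Int)
    if c > bestc then bgo (some d) c remaining else bgo best bestc remaining
termination_by rest.length
decreasing_by
  all_goals simp_all
  all_goals exact List.length_filter_le _ _

def func_max_orders_alt (client : String) (orders : List (String × String × String)) : String :=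
  let picks := (orders.filter (fun o => o.1 == client)).map (fun o => o.2.1)
  -- 'return best'; Python returns None on empty picks (outside Pre_), ported as ""
  match bgo none 0 picks with
  | some b => b
  | none => ""

-- ===== PRECONDITION & SPEC =====
-- Pre_ excludes exactly the inputs with no order of the given client, where Python's A raises ValueError (max of an empty dict).
def Pre_func_max_orders (client : String) (orders : List (String × String × String)) : Prop :=
  (orders.any (fun o => o.1 == client)) = true
instance (client : String) (orders : List (String × String × String)) : Decidable (Pre_func_max_orders client orders) := by unfold Pre_func_max_orders; infer_instance
def pvWitness_func_max_orders : String × (List (String × String × String)) := ("a", [("a", "soup", "1")])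
def Spec_func_max_orders (client : String) (orders : List (String × String × String)) (out : String) : Prop := out = func_max_orders_alt client orders
instance (client : String) (orders : List (String × String × String)) (out : String) : Decidable (Spec_func_max_orders client orders out) := by unfold Spec_func_max_orders; infer_instance

-- ===== CLAIM (what is proved, stated in full; the proofs are below) =====
def Claim_equal_func_max_orders : Prop := ∀ (client : String) (orders : List (String × String × String)), Dom_func_max_orders client orders → Pre_func_max_orders client orders → Spec_func_max_orders client orders (func_max_orders client orders)

-- ===== LEMMAS AND PROOFS =====

-- the fold step of PySem.List.max? (definitionally equal to its foldl body)
def mstep {α κ : Type} [LT κ] [DecidableLT κ] (g : α → κ) (acc : Option α) (x : α) : Option α :=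
  match acc with
  | none => some x
  | some m => if g m < g x then some x else some m

theorem max?_eq_foldl_mstep {α κ : Type} [LT κ] [DecidableLT κ] (xs : List α) (g : α → κ) :
    PySem.List.max? xs g = List.foldl (mstep g) none xs := rfl

theorem max?_map {α β : Type} (f : α → β) (key : β → Int) (xs : List α) :
    PySem.List.max? (xs.map f) key = Option.map f (PySem.List.max? xs (fun a => key (f a))) := by
  rw [max?_eq_foldl_mstep, max?_eq_foldl_mstep]
  have haux : ∀ (l : List α) (acc : Option α),
      List.foldl (mstep key) (Option.map f acc) (l.map f)
        = Option.map f (List.foldl (mstep (fun a => key (f a))) acc l) := by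
    intro l
    induction l with
    | nil => intro acc; simp
    | cons x r ih =>
        intro acc
        simp only [List.map_cons, List.foldl_cons]
        rw [show mstep key (Option.map f acc) (f x)
              = Option.map f (mstep (fun a => key (f a)) acc x) by
          cases acc with
          | none => rfl
          | some m => simp only [mstep, Option.map_some]; split <;> simp]
        exact ih _
  simpa using haux xs none

theorem foldl_guard_filter_map {α β γ : Type} (p : α → Bool) (f : α → β)
    (h : γ → β → γ) :
    ∀ (l : List α) (init : γ),
      List.foldl (fun d o => if p o then h d (f o) else d) init l
        = List.foldl h init ((l.filter p).map f) := by
  intro l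
  induction l with
  | nil => intro init; rfl
  | cons x r ih =>
      intro init
      by_cases hp : p x = true
      · simp [hp, ih]
      · simp [hp, ih]

theorem getD_zero_of_not_contains {κ : Type} [BEq κ] (d : PySem.Dict κ Int) (k : κ)
    (h : d.contains k = false) : d.getD k 0 = 0 := by
  have h' : d.items.any (fun p => p.1 == k) = false := h
  have hf : List.find? (fun p => p.1 == k) d.items = none :=
    List.find?_eq_none.mpr (fun p hp => by simpa using (List.any_eq_false.mp h' p hp))
  simp [PySem.Dict.getD, PySem.Dict.get?, hf]

theorem dishes_eq_counter (client : String) (orders : List (String × String × String)) :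
    orders.foldl
      (fun d o =>
        if o.1 == client then
          if d.contains o.2.1 then d.insert o.2.1 (d.getD o.2.1 0 + 1)
          else d.insert o.2.1 (1 : Int)
        else d)
      PySem.Dict.empty
    = PySem.Dict.counter ((orders.filter (fun o => o.1 == client)).map (fun o => o.2.1)) := by
  have hfun : (fun (d : PySem.Dict String Int) (o : String × String × String) =>
        if o.1 == client then
          if d.contains o.2.1 then d.insert o.2.1 (d.getD o.2.1 0 + 1)
          else d.insert o.2.1 (1 : Int)
        else d)
      = (fun d o => if o.1 == client then d.insert o.2.1 (d.getD o.2.1 0 + 1) else d) := by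
    funext d o
    by_cases hc : d.contains o.2.1 = true
    · simp [hc]
    · simp only [Bool.not_eq_true] at hc
      simp [hc, getD_zero_of_not_contains d o.2.1 hc]
  rw [hfun]
  exact (foldl_guard_filter_map (fun o => o.1 == client) (fun o => o.2.1)
      (fun (d : PySem.Dict String Int) x => d.insert x (d.getD x 0 + 1)) orders
      PySem.Dict.empty).trans
    (by rw [PySem.Dict.foldl_insert_getD_add_one_eq_counter])

-- Set.add over a cons prefix commutes when the prefix head never recurs
theorem foldl_setadd_cons {α : Type} [BEq α] :
    ∀ (l s : List α) (a : α), (∀ x ∈ l, (x == a) = false) →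
      List.foldl PySem.Set.add (a :: s) l = a :: List.foldl PySem.Set.add s l := by
  intro l
  induction l with
  | nil => intro s a _; rfl
  | cons x t ih =>
      intro s a h
      have hxa : (x == a) = false := h x (by simp)
      have hstep : PySem.Set.add (a :: s) x = a :: PySem.Set.add s x := by
        simp [PySem.Set.add, List.contains_cons, hxa]
        by_cases hc : s.contains x = true <;> simp [hc]
      simp only [List.foldl_cons, hstep]
      exact ih _ a (fun y hy => h y (by simp [hy]))

-- adding elements already present changes nothing: drop all occurrences of d when d ∈ s
theorem foldl_setadd_filter {α : Type} [BEq α] [LawfulBEq α] :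
    ∀ (l s : List α) (d : α), d ∈ s →
      List.foldl PySem.Set.add s l
        = List.foldl PySem.Set.add s (l.filter (fun x => !(x == d))) := by
  intro l
  induction l with
  | nil => intro s d _; rfl
  | cons x t ih =>
      intro s d hd
      by_cases hx : (x == d) = true
      · have hxd : x = d := by simpa using hx
        have hsx : PySem.Set.add s x = s := by
          subst hxd; unfold PySem.Set.add; simp [hd]
        simp only [List.filter_cons, hx, Bool.not_true, List.foldl_cons, hsx]
        exact ih s d hd
      · have hx' : (x == d) = false := by simpa using hx
        simp only [List.filter_cons, hx', Bool.not_false, List.foldl_cons]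
        exact ih _ d (by simp [PySem.Set.mem_add, hd])

-- first-occurrence dedup peels its head: set(d::t) = d :: set(t with d's removed)
theorem ofList_cons_filter {α : Type} [BEq α] [LawfulBEq α] (d : α) (t : List α) :
    PySem.Set.ofList (d :: t)
      = d :: PySem.Set.ofList (t.filter (fun x => !(x == d))) := by
  have h0 : PySem.Set.ofList (d :: t) = List.foldl PySem.Set.add [d] t := by
    simp [PySem.Set.ofList_eq_foldl, PySem.Set.add]
  rw [h0, foldl_setadd_filter t [d] d (by simp)]
  rw [foldl_setadd_cons _ [] d (fun x hx => by simpa using (List.mem_filter.mp hx).2)]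
  rw [PySem.Set.ofList_eq_foldl]

-- the length drop of the filter IS the count of the head
theorem count_eq_length_sub {α : Type} [BEq α] [LawfulBEq α] (l : List α) (d : α) :
    ((l.count d : Int)) = (l.length : Int) - ((l.filter (fun x => !(x == d))).length : Int) := by
  have h : l.count d + (l.filter (fun x => !(x == d))).length = l.length := by
    induction l with
    | nil => rfl
    | cons x t ih =>
        by_cases hx : x = d
        · subst hx
          simp only [List.count_cons_self, List.filter_cons, beq_self_eq_true,
            Bool.not_true, if_neg (by simp : ¬ (false = true)), List.length_cons]
          omega
        · have hbe : (x == d) = false := by simpa using hx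
          rw [List.count_cons_of_ne (a := d) (b := x) (fun h => hx h)]
          simp [hbe]
          omega
  omega

-- Source B's loop computes the first-maximum fold (mstep) over the distinct dishes in first-seen order
theorem bgo_eq_foldl :
    ∀ (n : Nat) (rest : List String), rest.length ≤ n →
    ∀ (key : String → Int) (best : Option String) (bestc : Int),
      (∀ x ∈ rest, (rest.count x : Int) = key x) →
      (match best with | none => bestc = 0 | some m => bestc = key m) →
      bgo best bestc rest = List.foldl (mstep key) best (PySem.Set.ofList rest) := by
  intro n
  induction n with
  | zero =>
      intro rest hlen key best bestc _ _
      have : rest = [] := List.length_eq_zero_iff.mp (Nat.le_zero.mp hlen)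
      subst this; rw [bgo]; cases best <;> rfl
  | succ n ih =>
      intro rest hlen key best bestc hkey hbest
      cases rest with
      | nil => rw [bgo]; cases best <;> rfl
      | cons d t =>
        rw [bgo]
        have hfil : (d :: t).filter (fun x => !(x == d)) = t.filter (fun x => !(x == d)) := by
          simp
        have hlen' : (t.filter (fun x => !(x == d))).length ≤ n :=
          le_trans (List.length_filter_le _ _) (by simpa using Nat.succ_le_succ_iff.mp hlen)
        have hc : ((d :: t).length : Int) - ((t.filter (fun x => !(x == d))).length : Int)
            = ((d :: t).count d : Int) := by
          rw [← hfil]; exact (count_eq_length_sub (d :: t) d).symm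
        have hkd : ((d :: t).count d : Int) = key d := hkey d (by simp)
        have hkey' : ∀ x ∈ t.filter (fun x => !(x == d)),
            ((t.filter (fun y => !(y == d))).count x : Int) = key x := by
          intro x hx
          have hxd : (x == d) = false := by simpa using (List.mem_filter.mp hx).2
          have hxd' : ¬ (x = d) := by simpa using hxd
          have h1 : (t.filter (fun y => !(y == d))).count x = t.count x := by
            rw [List.count_filter]
            simp [hxd]
          have h2 : (d :: t).count x = t.count x :=
            List.count_cons_of_ne (fun a => hxd' a.symm)
          rw [h1, ← h2]
          exact hkey x (List.mem_cons_of_mem d (List.mem_of_mem_filter hx))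
        have hcnt_pos : (1 : Int) ≤ ((d :: t).count d : Int) := by
          have : 1 ≤ (d :: t).count d := List.count_pos_iff.mpr (by simp)
          exact_mod_cast this
        rw [ofList_cons_filter, List.foldl_cons]
        simp only [hfil]
        rw [hc]
        cases best with
        | none =>
            have hb0 : bestc = 0 := hbest
            have hgt : ((d :: t).count d : Int) > bestc := by omega
            rw [if_pos hgt]
            have hmst : mstep key none d = some d := rfl
            rw [hmst, hkd]
            exact ih _ hlen' key (some d) (key d) hkey' rfl
        | some m =>
            have hbm : bestc = key m := hbest
            by_cases hgt : ((d :: t).count d : Int) > bestc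
            · rw [if_pos hgt]
              have hmst : mstep key (some m) d = some d := by
                simp [mstep, if_pos (show key m < key d by rw [← hkd, ← hbm]; exact hgt)]
              rw [hmst, hkd]
              exact ih _ hlen' key (some d) (key d) hkey' rfl
            · rw [if_neg hgt]
              have hmst : mstep key (some m) d = some m := by
                simp [mstep, if_neg (show ¬ key m < key d by rw [← hkd, ← hbm]; exact hgt)]
              rw [hmst]
              exact ih _ hlen' key (some m) bestc hkey' hbm

-- ===== VERDICT (by name: the statement is the Claim_ definition above) =====
theorem func_max_orders_spec : Claim_equal_func_max_orders := by
  intro client orders _ _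
  unfold Spec_func_max_orders func_max_orders func_max_orders_alt
  simp only [dishes_eq_counter client orders, PySem.Dict.items_counter]
  set picks := (orders.filter (fun o => o.1 == client)).map (fun o => o.2.1) with hp
  rw [max?_map (fun k => (k, (picks.count k : Int))) (fun p => p.2) (PySem.Set.ofList picks)]
  rw [bgo_eq_foldl picks.length picks (le_refl _) (fun x => (picks.count x : Int)) none 0
        (fun x _ => rfl) rfl]
  rw [← max?_eq_foldl_mstep]
  cases PySem.List.max? (PySem.Set.ofList picks) (fun a => (picks.count a : Int)) <;> rfl
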